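-- pv_equiv track=rewrite | github.com/paddya/advent-of-code-2022 | 17/tetris.py | numInLastFourRows
-- ===== SOURCE A (Python) =====
-- def numInLastFourRows(BLOCKED, curHeight):
--     num = 0
--     S = set()
--     for y in range(curHeight - 50, curHeight):
--         for x in range(0, 7):
--             if (y, x) in BLOCKED:
--                 num += 1
--                 S.add((y-curHeight+50, x))
--
--     return sorted(S)
-- ===== SOURCE B (Python) =====
-- def numInLastFourRows(BLOCKED, curHeight):
--     S = {(y - curHeight + 50, x)
--          for (y, x) in BLOCKED
--          if curHeight - 50 <= y < curHeight and 0 <= x < 7}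
--     return sorted(S)
-- ===== Notes on version B (the rewrite author's own statement) =====
-- stated objective: faster
-- what changed: Instead of probing all 350 cells of the 50x7 window with a linear membership scan of BLOCKED for each, B makes one pass over BLOCKED itself, keeping the in-window cells in a set comprehension, and drops the unused num counter.
import Mathlib
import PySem

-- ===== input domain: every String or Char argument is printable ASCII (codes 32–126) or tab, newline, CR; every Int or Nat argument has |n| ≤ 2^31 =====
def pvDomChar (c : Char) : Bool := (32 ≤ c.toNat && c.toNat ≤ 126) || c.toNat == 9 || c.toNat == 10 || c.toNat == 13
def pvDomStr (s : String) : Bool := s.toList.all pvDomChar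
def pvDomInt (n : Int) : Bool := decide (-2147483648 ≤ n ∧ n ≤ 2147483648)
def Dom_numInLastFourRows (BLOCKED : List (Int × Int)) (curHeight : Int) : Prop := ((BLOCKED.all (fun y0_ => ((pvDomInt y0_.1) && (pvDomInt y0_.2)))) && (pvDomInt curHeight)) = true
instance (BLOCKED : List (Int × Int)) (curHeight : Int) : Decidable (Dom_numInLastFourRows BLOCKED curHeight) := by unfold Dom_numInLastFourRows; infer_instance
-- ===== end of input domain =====

-- B replaces A's 350-cell window scan (each probing BLOCKED linearly) by a single
-- filtering pass over BLOCKED itself; objective: faster (fewer list scans).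


-- ===== PORT A =====
-- num = 0; S = set(); for y in range(curHeight-50, curHeight): for x in range(0,7):
--   if (y,x) in BLOCKED: num += 1; S.add((y-curHeight+50, x))
-- return sorted(S)   (tuples sort lexicographically → sorted2)
def numInLastFourRows (BLOCKED : List (Int × Int)) (curHeight : Int) : List (Int × Int) :=
  let st : Int × PySem.Set (Int × Int) :=
    (PySem.List.pyRange (curHeight - 50) curHeight 1).foldl
      (fun st y =>
        (PySem.List.pyRange 0 7 1).foldl
          (fun st x =>
            if (y, x) ∈ BLOCKED then
              (st.1 + 1, PySem.Set.add st.2 (y - curHeight + 50, x))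
            else st)
          st)
      (0, PySem.Set.empty)
  PySem.List.sorted2 st.2 (fun p => p.1) (fun p => p.2)

-- ===== PORT B =====
-- S = {(y-curHeight+50, x) for (y,x) in BLOCKED if curHeight-50 <= y < curHeight and 0 <= x < 7}
-- return sorted(S)
def numInLastFourRows_alt (BLOCKED : List (Int × Int)) (curHeight : Int) : List (Int × Int) :=
  let S : PySem.Set (Int × Int) :=
    PySem.Set.ofList
      ((BLOCKED.filter (fun p =>
          decide (curHeight - 50 ≤ p.1) && decide (p.1 < curHeight) &&
          decide (0 ≤ p.2) && decide (p.2 < 7))).map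
        (fun p => (p.1 - curHeight + 50, p.2)))
  PySem.List.sorted2 S (fun p => p.1) (fun p => p.2)

-- ===== PRECONDITION & SPEC =====
def Spec_numInLastFourRows (BLOCKED : List (Int × Int)) (curHeight : Int) (out : List (Int × Int)) : Prop := out = numInLastFourRows_alt BLOCKED curHeight
instance (BLOCKED : List (Int × Int)) (curHeight : Int) (out : List (Int × Int)) : Decidable (Spec_numInLastFourRows BLOCKED curHeight out) := by unfold Spec_numInLastFourRows; infer_instance

-- ===== CLAIM (what is proved, stated in full; the proofs are below) =====
def Claim_equal_numInLastFourRows : Prop := ∀ (BLOCKED : List (Int × Int)) (curHeight : Int), Dom_numInLastFourRows BLOCKED curHeight → Spec_numInLastFourRows BLOCKED curHeight (numInLastFourRows BLOCKED curHeight)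

-- ===== LEMMAS AND PROOFS =====

-- Python's tuple sort (sorted2 on component keys) IS sorted with the lexicographic key.
theorem sorted2_eq_sorted_lex (xs : List (Int × Int)) :
    PySem.List.sorted2 xs (fun p => p.1) (fun p => p.2) =
    PySem.List.sorted xs (fun p => toLex p) := by
  rw [PySem.List.sorted_eq_foldl_insertBy]
  show List.foldl (fun acc x => PySem.List.insertBy _ x acc) [] xs = _
  congr 1
  funext acc x
  congr 1
  funext a b
  simp only [Prod.Lex.toLex_lt_toLex]
  by_cases h1 : a.1 < b.1 <;> by_cases h2 : b.1 < a.1 <;> by_cases h3 : a.2 < b.2 <;>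
    simp [h1, h2, h3] <;> omega

-- membership in the set A builds (inner loop over x, then outer loop over y)
theorem mem_inner_fold (BLOCKED : List (Int × Int)) (curHeight y : Int)
    (xs : List Int) (st : Int × PySem.Set (Int × Int)) (hn : st.2.Nodup) :
    (∀ p : Int × Int,
      p ∈ (xs.foldl (fun st x =>
        if (y, x) ∈ BLOCKED then (st.1 + 1, PySem.Set.add st.2 (y - curHeight + 50, x)) else st)
        st).2 ↔
      p ∈ st.2 ∨ ∃ x ∈ xs, (y, x) ∈ BLOCKED ∧ p = (y - curHeight + 50, x)) ∧
    (xs.foldl (fun st x =>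
        if (y, x) ∈ BLOCKED then (st.1 + 1, PySem.Set.add st.2 (y - curHeight + 50, x)) else st)
        st).2.Nodup := by
  induction xs generalizing st with
  | nil => simpa using hn
  | cons x xs ih =>
    by_cases hb : (y, x) ∈ BLOCKED
    · have h2 := ih (st := (st.1 + 1, PySem.Set.add st.2 (y - curHeight + 50, x)))
        (PySem.Set.nodup_add _ _ hn)
      simp only [List.foldl_cons, if_pos hb]
      refine ⟨fun p => ?_, h2.2⟩
      rw [h2.1 p]
      simp only [PySem.Set.mem_add, List.mem_cons]
      constructor
      · rintro ((h | h) | ⟨x', hx', hb', hp⟩)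
        · exact Or.inl h
        · exact Or.inr ⟨x, Or.inl rfl, hb, h⟩
        · exact Or.inr ⟨x', Or.inr hx', hb', hp⟩
      · rintro (h | ⟨x', (rfl | hx'), hb', hp⟩)
        · exact Or.inl (Or.inl h)
        · exact Or.inl (Or.inr hp)
        · exact Or.inr ⟨x', hx', hb', hp⟩
    · have h2 := ih (st := st) hn
      simp only [List.foldl_cons, if_neg hb]
      refine ⟨fun p => ?_, h2.2⟩
      rw [h2.1 p]
      simp only [List.mem_cons]
      constructor
      · rintro (h | ⟨x', hx', hb', hp⟩)
        · exact Or.inl h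
        · exact Or.inr ⟨x', Or.inr hx', hb', hp⟩
      · rintro (h | ⟨x', (rfl | hx'), hb', hp⟩)
        · exact Or.inl h
        · exact absurd hb' hb
        · exact Or.inr ⟨x', hx', hb', hp⟩

theorem mem_outer_fold (BLOCKED : List (Int × Int)) (curHeight : Int)
    (ys : List Int) (st : Int × PySem.Set (Int × Int)) (hn : st.2.Nodup) :
    (∀ p : Int × Int,
      p ∈ (ys.foldl (fun st y =>
        (PySem.List.pyRange 0 7 1).foldl (fun st x =>
          if (y, x) ∈ BLOCKED then (st.1 + 1, PySem.Set.add st.2 (y - curHeight + 50, x)) else st)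
          st) st).2 ↔
      p ∈ st.2 ∨ ∃ y ∈ ys, ∃ x ∈ PySem.List.pyRange 0 7 1,
        (y, x) ∈ BLOCKED ∧ p = (y - curHeight + 50, x)) ∧
    (ys.foldl (fun st y =>
        (PySem.List.pyRange 0 7 1).foldl (fun st x =>
          if (y, x) ∈ BLOCKED then (st.1 + 1, PySem.Set.add st.2 (y - curHeight + 50, x)) else st)
          st) st).2.Nodup := by
  induction ys generalizing st with
  | nil => simpa using hn
  | cons y ys ih =>
    have hinner := mem_inner_fold BLOCKED curHeight y (PySem.List.pyRange 0 7 1) st hn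
    have h2 := ih (st := (PySem.List.pyRange 0 7 1).foldl (fun st x =>
        if (y, x) ∈ BLOCKED then (st.1 + 1, PySem.Set.add st.2 (y - curHeight + 50, x)) else st) st)
      hinner.2
    simp only [List.foldl_cons]
    refine ⟨fun p => ?_, h2.2⟩
    rw [h2.1 p, hinner.1 p]
    simp only [List.mem_cons]
    constructor
    · rintro ((h | ⟨x, hx, hb, hp⟩) | ⟨y', hy', hrest⟩)
      · exact Or.inl h
      · exact Or.inr ⟨y, Or.inl rfl, x, hx, hb, hp⟩
      · exact Or.inr ⟨y', Or.inr hy', hrest⟩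
    · rintro (h | ⟨y', (rfl | hy'), x, hx, hb, hp⟩)
      · exact Or.inl (Or.inl h)
      · exact Or.inl (Or.inr ⟨x, hx, hb, hp⟩)
      · exact Or.inr ⟨y', hy', x, hx, hb, hp⟩

theorem sets_perm (BLOCKED : List (Int × Int)) (curHeight : Int) :
    ((PySem.List.pyRange (curHeight - 50) curHeight 1).foldl
      (fun st y => (PySem.List.pyRange 0 7 1).foldl
        (fun st x => if (y, x) ∈ BLOCKED then
            ((st.1 + 1 : Int), PySem.Set.add st.2 (y - curHeight + 50, x)) else st) st)
      (0, PySem.Set.empty)).2.Perm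
    (PySem.Set.ofList
      ((BLOCKED.filter (fun p =>
          decide (curHeight - 50 ≤ p.1) && decide (p.1 < curHeight) &&
          decide (0 ≤ p.2) && decide (p.2 < 7))).map
        (fun p => (p.1 - curHeight + 50, p.2)))) := by
  have h := mem_outer_fold BLOCKED curHeight (PySem.List.pyRange (curHeight - 50) curHeight 1)
    (0, PySem.Set.empty) (by simp [PySem.Set.empty])
  rw [List.perm_ext_iff_of_nodup h.2 (PySem.Set.nodup_ofList _)]
  intro p
  rw [h.1 p]
  simp only [PySem.Set.mem_ofList, List.mem_map, List.mem_filter, PySem.List.mem_pyRange_one,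
    PySem.Set.empty, List.not_mem_nil, false_or]
  constructor
  · rintro ⟨y, ⟨hy1, hy2⟩, x, ⟨hx1, hx2⟩, hb, rfl⟩
    exact ⟨(y, x), ⟨hb, by simp; omega⟩, rfl⟩
  · rintro ⟨⟨y, x⟩, ⟨hb, hbnd⟩, rfl⟩
    simp only [Bool.and_eq_true, decide_eq_true_eq] at hbnd
    exact ⟨y, ⟨hbnd.1.1.1, hbnd.1.1.2⟩, x, ⟨hbnd.1.2, hbnd.2⟩, hb, rfl⟩

-- ===== VERDICT (by name: the statement is the Claim_ definition above) =====
theorem numInLastFourRows_spec : Claim_equal_numInLastFourRows := by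
  intro BLOCKED curHeight _
  unfold Spec_numInLastFourRows numInLastFourRows numInLastFourRows_alt
  simp only
  rw [sorted2_eq_sorted_lex, sorted2_eq_sorted_lex]
  exact PySem.List.eq_of_perm_of_pairwise_le_of_injective (fun p => toLex p)
    (fun a b h => h)
    ((PySem.List.sorted_perm _ _ _).trans
      ((sets_perm BLOCKED curHeight).trans (PySem.List.sorted_perm _ _ _).symm))
    (PySem.List.sorted_pairwise _ _)
    (PySem.List.sorted_pairwise _ _)
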